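-- pv_equiv track=rewrite | github.com/JungDayoon/AlgorithmStudy | Programmers/[12984] 지형 편집/n__aj22/12984_1.py | calculate
-- ===== SOURCE A (Python) =====
-- def calculate(land, P, Q, N, height):
--     total = 0
--     for i in range(N):
--         for j in range(N):
--             if land[i][j]>height:
--                 total += ((land[i][j] - height)*Q)
--             if land[i][j]<height:
--                 total += ((height - land[i][j])*P)
--     return total
-- ===== SOURCE B (Python) =====
-- def calculate(land, P, Q, N, height):
--     # aggregate-based: flatten the N x N region with slices, partition by height,
--     # then compute the total from sums and counts in closed form
--     cells = []
--     for i in range(N):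
--         cells.extend(land[i][:N])
--     above = [v for v in cells if v > height]
--     below = [v for v in cells if v < height]
--     return Q * (sum(above) - len(above) * height) + P * (len(below) * height - sum(below))
-- ===== Notes on version B (the rewrite author's own statement) =====
-- stated objective: alternative
-- what changed: Replaces A's per-cell if/if cost accumulation inside a nested index loop with an aggregate computation: flatten the region by row slices, partition the cells into above/below height, and obtain the total from the partitions' sums and lengths by the closed-form identity Q*(sum_above - count_above*height) + P*(count_below*height - sum_below).
import Mathlib
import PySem

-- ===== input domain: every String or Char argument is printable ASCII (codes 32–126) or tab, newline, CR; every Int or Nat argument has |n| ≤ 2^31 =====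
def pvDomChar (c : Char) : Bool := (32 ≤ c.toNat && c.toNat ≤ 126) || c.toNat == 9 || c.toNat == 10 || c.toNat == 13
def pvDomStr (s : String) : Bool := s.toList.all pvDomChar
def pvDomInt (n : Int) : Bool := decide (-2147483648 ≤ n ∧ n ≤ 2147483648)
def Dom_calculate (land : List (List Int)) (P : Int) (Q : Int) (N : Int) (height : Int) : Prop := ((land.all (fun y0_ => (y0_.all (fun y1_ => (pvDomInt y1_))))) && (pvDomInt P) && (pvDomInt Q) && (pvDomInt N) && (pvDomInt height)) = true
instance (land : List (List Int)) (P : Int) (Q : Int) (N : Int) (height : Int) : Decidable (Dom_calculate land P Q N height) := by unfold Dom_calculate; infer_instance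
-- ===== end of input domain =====

-- B replaces A's per-cell cost accumulation with an aggregate computation: flatten the
-- region by row slices, partition by height, and use a closed form over sums and counts.


-- ===== PORT A =====
def calculate (land : List (List Int)) (P : Int) (Q : Int) (N : Int) (height : Int) : Int :=
  (PySem.List.pyRange 0 N 1).foldl (fun total i =>
    (PySem.List.pyRange 0 N 1).foldl (fun total j =>
      let v := PySem.List.pyGetD (PySem.List.pyGetD land i []) j 0
      let total := if v > height then total + (v - height) * Q else total
      if v < height then total + (height - v) * P else total) total) 0

-- ===== PORT B =====
def calculate_alt (land : List (List Int)) (P : Int) (Q : Int) (N : Int) (height : Int) : Int :=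
  let cells := (PySem.List.pyRange 0 N 1).foldl (fun acc i =>
    acc ++ PySem.List.slice (PySem.List.pyGetD land i []) none (some N)) []
  let above := cells.filter (fun v => v > height)
  let below := cells.filter (fun v => v < height)
  Q * (above.sum - (above.length : Int) * height) + P * ((below.length : Int) * height - below.sum)

-- ===== PRECONDITION & SPEC =====
-- Pre_ excludes exactly the inputs where A raises IndexError: N exceeding the number of rows,
-- or a row inside the N x N region shorter than N.
def Pre_calculate (land : List (List Int)) (P : Int) (Q : Int) (N : Int) (height : Int) : Prop :=
  N ≤ (land.length : Int) ∧ ∀ row ∈ land.take N.toNat, N ≤ (row.length : Int)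
instance (land : List (List Int)) (P : Int) (Q : Int) (N : Int) (height : Int) : Decidable (Pre_calculate land P Q N height) := by unfold Pre_calculate; infer_instance
def pvWitness_calculate : List (List Int) × Int × Int × Int × Int := ([[1, 2], [3, 4]], 2, 3, 2, 2)
def Spec_calculate (land : List (List Int)) (P : Int) (Q : Int) (N : Int) (height : Int) (out : Int) : Prop := out = calculate_alt land P Q N height
instance (land : List (List Int)) (P : Int) (Q : Int) (N : Int) (height : Int) (out : Int) : Decidable (Spec_calculate land P Q N height out) := by unfold Spec_calculate; infer_instance

-- ===== CLAIM (what is proved, stated in full; the proofs are below) =====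
def Claim_equal_calculate : Prop := ∀ (land : List (List Int)) (P : Int) (Q : Int) (N : Int) (height : Int), Dom_calculate land P Q N height → Pre_calculate land P Q N height → Spec_calculate land P Q N height (calculate land P Q N height)

-- ===== LEMMAS AND PROOFS =====

-- per-cell cost of one elevation value
def pvCost (P Q height v : Int) : Int :=
  if v > height then (v - height) * Q else if v < height then (height - v) * P else 0

-- inner loop of A
theorem innerA (row : List Int) (P Q N height : Int) (h0 : 0 ≤ N) (hlen : N ≤ (row.length : Int)) (t : Int) :
    (PySem.List.pyRange 0 N 1).foldl (fun total j =>
      let v := PySem.List.pyGetD row j 0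
      let total := if v > height then total + (v - height) * Q else total
      if v < height then total + (height - v) * P else total) t
    = t + ((row.take N.toNat).map (pvCost P Q height)).sum := by
  have hNlen : ((row.take N.toNat).length : Int) = N := by
    simp [List.length_take]; omega
  rw [show PySem.List.pyRange 0 N 1 = PySem.List.pyRange 0 ((row.take N.toNat).length : Int) 1 by rw [hNlen]]
  rw [PySem.List.foldl_congr_mem _ _ (fun total j =>
      let v := PySem.List.pyGetD (row.take N.toNat) j 0
      let total := if v > height then total + (v - height) * Q else total
      if v < height then total + (height - v) * P else total) t ?_]
  · rw [PySem.List.foldl_pyRange_zero_pyGetD' (row.take N.toNat) 0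
      (fun total v =>
        let total := if v > height then total + (v - height) * Q else total
        if v < height then total + (height - v) * P else total) t]
    rw [PySem.List.foldl_congr_mem _ _ (fun total v => total + pvCost P Q height v) t ?_]
    · exact PySem.List.foldl_add _ _ _
    · intro acc v _
      simp only [pvCost]
      split_ifs <;> omega
  · intro acc j hj
    rw [PySem.List.mem_pyRange_one] at hj
    have hj2 : j < N := by rw [← hNlen]; exact hj.2
    have hjr : j < (row.length : Int) := by omega
    simp only [PySem.List.pyGetD_eq_getElem row 0 hj.1 hjr,
        PySem.List.pyGetD_eq_getElem (List.take N.toNat row) 0 hj.1 hj.2]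
    simp [List.getElem_take]

theorem sum_flatMap' {α : Type} (l : List α) (f : α → List Int) :
    (l.flatMap f).sum = (l.map (fun a => (f a).sum)).sum := by
  induction l with
  | nil => simp
  | cons a t ih => simp [List.flatMap_cons, List.sum_append, ih]

theorem calcA_eq_sum (land : List (List Int)) (P Q N height : Int) (h0 : 0 ≤ N)
    (h : Pre_calculate land P Q N height) :
    calculate land P Q N height =
      (((land.take N.toNat).flatMap (fun row => row.take N.toNat)).map (pvCost P Q height)).sum := by
  obtain ⟨hlen, hrows⟩ := h
  have hNlen : ((land.take N.toNat).length : Int) = N := by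
    simp [List.length_take]; omega
  unfold calculate
  rw [show PySem.List.pyRange 0 N 1 = PySem.List.pyRange 0 ((land.take N.toNat).length : Int) 1 by rw [hNlen]]
  rw [PySem.List.foldl_congr_mem _ _ (fun total i =>
      (PySem.List.pyRange 0 N 1).foldl (fun total j =>
        let v := PySem.List.pyGetD (PySem.List.pyGetD (land.take N.toNat) i []) j 0
        let total := if v > height then total + (v - height) * Q else total
        if v < height then total + (height - v) * P else total) total) 0 ?_]
  · rw [PySem.List.foldl_pyRange_zero_pyGetD' (land.take N.toNat) []
      (fun total row =>
        (PySem.List.pyRange 0 N 1).foldl (fun total j =>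
          let v := PySem.List.pyGetD row j 0
          let total := if v > height then total + (v - height) * Q else total
          if v < height then total + (height - v) * P else total) total) 0]
    rw [PySem.List.foldl_congr_mem _ _ (fun total row =>
        total + ((row.take N.toNat).map (pvCost P Q height)).sum) 0 ?_]
    · rw [PySem.List.foldl_add, List.map_flatMap, sum_flatMap']
      simp
    · intro acc row hrow
      exact innerA row P Q N height h0 (hrows row hrow) acc
  · intro acc i hi
    rw [PySem.List.mem_pyRange_one] at hi
    have hi2 : i < N := by rw [← hNlen]; exact hi.2
    have hil : i < (land.length : Int) := by omega
    simp only [PySem.List.pyGetD_eq_getElem land [] hi.1 hil,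
      PySem.List.pyGetD_eq_getElem (List.take N.toNat land) [] hi.1 hi.2]
    simp only [List.getElem_take]
    simp only [hNlen]

-- B's cell extraction equals the flattened N x N region
theorem cellsB_eq (land : List (List Int)) (N : Int) (h0 : 0 ≤ N)
    (hlen : N ≤ (land.length : Int)) (hrows : ∀ row ∈ land.take N.toNat, N ≤ (row.length : Int)) :
    (PySem.List.pyRange 0 N 1).foldl (fun acc i =>
      acc ++ PySem.List.slice (PySem.List.pyGetD land i []) none (some N)) []
    = (land.take N.toNat).flatMap (fun row => row.take N.toNat) := by
  rw [PySem.List.foldl_append_eq_flatMap]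
  rw [List.nil_append]
  have hNlen : (((land.take N.toNat).map (fun row => row.take N.toNat)).length : Int) = N := by
    simp [List.length_take]; omega
  rw [List.flatMap_def, List.flatMap_def]
  congr 1
  rw [show PySem.List.pyRange 0 N 1
      = PySem.List.pyRange 0 (((land.take N.toNat).map (fun row => row.take N.toNat)).length : Int) 1 by rw [hNlen]]
  rw [List.map_congr_left (g := fun i =>
      PySem.List.pyGetD ((land.take N.toNat).map (fun row => row.take N.toNat)) i []) ?_]
  · exact PySem.List.map_pyGetD_pyRange_zero' _ []
  · intro i hi
    rw [PySem.List.mem_pyRange_one] at hi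
    have hi2 : i < N := by rw [← hNlen]; exact hi.2
    have hil : i < (land.length : Int) := by omega
    simp only [PySem.List.pyGetD_eq_getElem land [] hi.1 hil,
        PySem.List.pyGetD_eq_getElem ((land.take N.toNat).map (fun row => row.take N.toNat)) []
          hi.1 (by simpa using hi.2)]
    rw [PySem.List.slice_to _ h0]
    simp [List.getElem_take]

-- splitting the per-cell cost sum into the above/below aggregates
theorem cost_split (P Q height : Int) (cells : List Int) :
    (cells.map (pvCost P Q height)).sum
      = Q * ((cells.filter (fun v => v > height)).sum
              - ((cells.filter (fun v => v > height)).length : Int) * height)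
      + P * (((cells.filter (fun v => v < height)).length : Int) * height
              - (cells.filter (fun v => v < height)).sum) := by
  induction cells with
  | nil => simp
  | cons v t ih =>
    rcases lt_trichotomy v height with h | h | h
    · have e1 : (decide (v > height)) = false := by simp; omega
      have e2 : (decide (v < height)) = true := by simp [h]
      have ec : pvCost P Q height v = (height - v) * P := by
        simp only [pvCost]; rw [if_neg (by omega), if_pos h]
      simp only [List.map_cons, List.sum_cons, List.filter_cons, e1, e2,
        Bool.false_eq_true, if_true, if_false, List.length_cons, ih, ec]
      push_cast
      ring
    · subst h
      have e1 : (decide (v > v)) = false := by simp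
      have e2 : (decide (v < v)) = false := by simp
      have ec : pvCost P Q v v = 0 := by
        simp only [pvCost]; rw [if_neg (by omega), if_neg (by omega)]
      simp only [List.map_cons, List.sum_cons, List.filter_cons, e1, e2,
        Bool.false_eq_true, if_false, ih, ec]
      ring
    · have e1 : (decide (v > height)) = true := by simp [h]
      have e2 : (decide (v < height)) = false := by simp; omega
      have ec : pvCost P Q height v = (v - height) * Q := by
        simp only [pvCost]; rw [if_pos h]
      simp only [List.map_cons, List.sum_cons, List.filter_cons, e1, e2,
        Bool.false_eq_true, if_true, if_false, List.length_cons, ih, ec]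
      push_cast
      ring

theorem calcB_eq_sum (land : List (List Int)) (P Q N height : Int) (h0 : 0 ≤ N)
    (h : Pre_calculate land P Q N height) :
    calculate_alt land P Q N height =
      (((land.take N.toNat).flatMap (fun row => row.take N.toNat)).map (pvCost P Q height)).sum := by
  obtain ⟨hlen, hrows⟩ := h
  unfold calculate_alt
  rw [cellsB_eq land N h0 hlen hrows]
  rw [cost_split]

-- ===== VERDICT (by name: the statement is the Claim_ definition above) =====
theorem calculate_spec : Claim_equal_calculate := by
  intro land P Q N height _ hPre
  unfold Spec_calculate
  by_cases h0 : 0 ≤ N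
  · rw [calcA_eq_sum land P Q N height h0 hPre, calcB_eq_sum land P Q N height h0 hPre]
  · simp [calculate, calculate_alt, PySem.List.pyRange_one_eq_nil (show N ≤ 0 by omega)]
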